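-- pv_equiv track=rewrite | github.com/tongjirc/cursorAgent | slack_listener.py | _is_infra_failure
-- ===== SOURCE A (Python) =====
-- def _is_infra_failure(output):
--     """Check if output is an infrastructure/auth error (not a real test failure)."""
--     infra_indicators = [
--         "static-login.nvidia.com",
--         "buildauth COMMAND FAILED",
--         "http status 401",
--         "Please login",
--         "login process",
--         "user_code=",
--         "Ensure that you are on the NVIDIA network",
--     ]
--     return any(ind in (output or "") for ind in infra_indicators)
-- ===== SOURCE B (Python) =====
-- import re
--
-- _INFRA_PATTERN = re.compile("|".join(re.escape(ind) for ind in (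
--     "static-login.nvidia.com",
--     "buildauth COMMAND FAILED",
--     "http status 401",
--     "Please login",
--     "login process",
--     "user_code=",
--     "Ensure that you are on the NVIDIA network",
-- )))
--
-- def _is_infra_failure(output):
--     """Check if output is an infrastructure/auth error (not a real test failure)."""
--     return bool(_INFRA_PATTERN.search(output or ""))
-- ===== Notes on version B (the rewrite author's own statement) =====
-- stated objective: idiomatic
-- what changed: Replaced the per-indicator generator with one precompiled regex alternation (re.escape-d) so a single automaton scan over the text decides the match.
import Mathlib
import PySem

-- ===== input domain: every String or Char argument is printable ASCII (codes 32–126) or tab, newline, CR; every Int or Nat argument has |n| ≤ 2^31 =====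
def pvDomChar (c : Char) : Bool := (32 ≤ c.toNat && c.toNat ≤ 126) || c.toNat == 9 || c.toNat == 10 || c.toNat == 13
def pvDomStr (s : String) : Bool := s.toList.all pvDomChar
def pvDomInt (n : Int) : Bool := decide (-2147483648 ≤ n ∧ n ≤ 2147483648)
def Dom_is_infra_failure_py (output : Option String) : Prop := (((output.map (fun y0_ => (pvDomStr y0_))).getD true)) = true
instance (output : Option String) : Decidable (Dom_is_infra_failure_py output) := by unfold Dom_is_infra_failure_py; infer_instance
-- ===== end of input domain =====

-- B replaces the per-indicator substring loop with one left-to-right scan over the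
-- text that tests every indicator as a prefix at each position (the hand-port of
-- Source B's single compiled regex-alternation search); idiomatic/alternative, not faster.

-- ===== PORT A =====
def infraIndicators : List String :=
  [ "static-login.nvidia.com"
  , "buildauth COMMAND FAILED"
  , "http status 401"
  , "Please login"
  , "login process"
  , "user_code="
  , "Ensure that you are on the NVIDIA network" ]

-- any(ind in (output or "") for ind in infra_indicators)
def is_infra_failure_py (output : Option String) : Bool :=
  infraIndicators.any (fun ind => PySem.Str.isIn ind (output.getD ""))

-- ===== PORT B =====
-- exact hand-port of Source B's _INFRA_PATTERN.search: a regex alternation of escaped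
-- literals matches iff at some position of the text one of the literals is a prefix
-- of the remaining suffix; the scan walks the suffixes left to right.
def infraAltScan (cs : List Char) : Bool :=
  if infraIndicators.any (fun ind => PySem.Chars.startswith cs ind.toList) then true
  else
    match cs with
    | [] => false
    | _ :: t => infraAltScan t

def is_infra_failure_py_alt (output : Option String) : Bool :=
  infraAltScan (output.getD "").toList

-- ===== PRECONDITION & SPEC =====
def Spec_is_infra_failure_py (output : Option String) (out : Bool) : Prop := out = is_infra_failure_py_alt output
instance (output : Option String) (out : Bool) : Decidable (Spec_is_infra_failure_py output out) := by unfold Spec_is_infra_failure_py; infer_instance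

-- ===== CLAIM (what is proved, stated in full; the proofs are below) =====
def Claim_equal_is_infra_failure_py : Prop := ∀ (output : Option String), Dom_is_infra_failure_py output → Spec_is_infra_failure_py output (is_infra_failure_py output)

-- ===== LEMMAS AND PROOFS =====

-- the scan finds a match iff some indicator is a prefix of some suffix
theorem infraAltScan_iff (cs : List Char) :
    infraAltScan cs = true ↔ ∃ j, ∃ ind ∈ infraIndicators, ind.toList <+: cs.drop j := by
  induction cs with
  | nil =>
      simp only [infraAltScan]
      constructor
      · intro h
        split at h
        · rename_i hany
          rw [List.any_eq_true] at hany
          obtain ⟨ind, hmem, hsw⟩ := hany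
          exact ⟨0, ind, hmem, (PySem.Chars.startswith_iff _ _).mp hsw⟩
        · simp at h
      · rintro ⟨j, ind, hmem, hpre⟩
        simp only [List.drop_nil] at hpre
        have : PySem.Chars.startswith ([] : List Char) ind.toList = true :=
          (PySem.Chars.startswith_iff _ _).mpr hpre
        rw [if_pos (List.any_eq_true.mpr ⟨ind, hmem, this⟩)]
  | cons c t ih =>
      simp only [infraAltScan]
      constructor
      · intro h
        split at h
        · rename_i hany
          rw [List.any_eq_true] at hany
          obtain ⟨ind, hmem, hsw⟩ := hany
          exact ⟨0, ind, hmem, by simpa using (PySem.Chars.startswith_iff _ _).mp hsw⟩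
        · obtain ⟨j, ind, hmem, hpre⟩ := ih.mp h
          exact ⟨j + 1, ind, hmem, by simpa using hpre⟩
      · rintro ⟨j, ind, hmem, hpre⟩
        by_cases hany : infraIndicators.any (fun ind => PySem.Chars.startswith (c :: t) ind.toList) = true
        · rw [if_pos hany]
        · rw [if_neg hany]
          cases j with
          | zero =>
              exfalso
              apply hany
              exact List.any_eq_true.mpr ⟨ind, hmem, (PySem.Chars.startswith_iff _ _).mpr (by simpa using hpre)⟩
          | succ j' =>
              exact ih.mpr ⟨j', ind, hmem, by simpa using hpre⟩

-- ===== VERDICT (by name: the statement is the Claim_ definition above) =====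
theorem is_infra_failure_py_spec : Claim_equal_is_infra_failure_py := by
  intro output _
  unfold Spec_is_infra_failure_py
  unfold is_infra_failure_py is_infra_failure_py_alt
  set s := output.getD ""
  rcases Bool.eq_false_or_eq_true (infraAltScan s.toList) with h | h
  · rw [h]
    obtain ⟨j, ind, hmem, hpre⟩ := (infraAltScan_iff _).mp h
    rw [List.any_eq_true]
    refine ⟨ind, hmem, ?_⟩
    rw [PySem.Str.isIn_iff_infix]
    exact (hpre.isInfix).trans (List.drop_suffix j s.toList).isInfix
  · rw [h, List.any_eq_false]
    intro ind hmem
    rw [PySem.Str.isIn_iff_infix]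
    intro hinf
    obtain ⟨t, hpt, hts⟩ := List.infix_iff_prefix_suffix.mp hinf
    have hj : t = s.toList.drop (s.toList.length - t.length) := List.suffix_iff_eq_drop.mp hts
    have : infraAltScan s.toList = true :=
      (infraAltScan_iff _).mpr ⟨s.toList.length - t.length, ind, hmem, hj ▸ hpt⟩
    rw [h] at this; exact absurd this (by simp)
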